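-- pv_equiv track=rewrite | github.com/ShenLab/MDmis | code/Data_pre_processing/process_GPCRmd_MD.py | split_alignment
-- ===== SOURCE A (Python) =====
-- def split_alignment(aligned_query, aligned_target, min_match_length=5):
--     """
--     Splits the alignment into segments where the query and target have continuous matches longer than min_match_length.
--     """
--     matches = []
--
--     in_match = False
--     query_pos = 0
--     target_pos = 0
--     for (q_res, t_res) in zip(aligned_query, aligned_target):
--         aligned_query_true_length = len(aligned_query.replace("-", ""))
--         if (q_res != "-") and (t_res !="-"):
--             if not in_match:
--                 #Start of a new match
--                 target_start = target_pos
--                 query_start = query_pos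
--                 in_match = True
--
--
--         elif (q_res == "-") or (t_res == "-"):
--             if in_match:
--                 #End of the current match
--                 target_end = target_pos
--                 query_end = query_pos
--
--                 matches.append({"query_start": query_start,
--                                 "query_end": query_end,
--                                 "target_start": target_start,
--                                 "target_end": target_end})
--                 in_match = False
--
--         else:
--             raise ValueError("Non standard character in alignment")
--         if q_res != "-":
--             query_pos+=1 #query pos only moves if we encounter a character
--         target_pos +=1 #target pos always moves forward
--     if in_match: #capturing a match if it was at the end
--         matches.append({        "query_start": query_start,
--                                 "query_end": aligned_query_true_length,
--                                 "target_start": target_start,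
--                                 "target_end": len(aligned_target)})
--
--     filtered_matches = [
--         match for match in matches if (match["target_end"] - match["target_start"] + 1) >= min_match_length
--     ]
--     return filtered_matches
-- ===== SOURCE B (Python) =====
-- def split_alignment(aligned_query, aligned_target, min_match_length=5):
--     """
--     Splits the alignment into segments where the query and target have continuous matches longer than min_match_length.
--
--     Decomposition: a prefix array of non-gap query counts plus the list of gap
--     positions in the zipped alignment; each gap closes the run before it, and
--     the run after the last gap is closed by the ends of the sequences.
--     """
--     pairs = list(zip(aligned_query, aligned_target))
--     # prefix[i] = number of non-gap query characters among the first i zipped positions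
--     prefix = [0]
--     for qc, _ in pairs:
--         prefix.append(prefix[-1] + (qc != '-'))
--     gaps = [i for i, (qc, tc) in enumerate(pairs) if qc == '-' or tc == '-']
--     starts = [0] + [g + 1 for g in gaps]
--     segments = [(prefix[s], prefix[g], s, g) for s, g in zip(starts, gaps) if s < g]
--     # the run after the last gap, if non-empty, runs to the ends of the sequences
--     s = starts[-1]
--     if s < len(pairs):
--         segments.append((prefix[s], len(aligned_query) - aligned_query.count('-'),
--                          s, len(aligned_target)))
--     return [{"query_start": qs, "query_end": qe, "target_start": ts, "target_end": te}
--             for qs, qe, ts, te in segments if te - ts + 1 >= min_match_length]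
-- ===== Notes on version B (the rewrite author's own statement) =====
-- stated objective: faster
-- what changed: Replaced A's flag-driven per-character state machine, which recomputes len(aligned_query.replace('-','')) on every loop iteration, by a gap-boundary decomposition: a prefix array of non-gap query counts plus the list of gap positions, with segments read off between consecutive gaps and the tail after the last gap closed by the sequence ends.
import Mathlib
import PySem

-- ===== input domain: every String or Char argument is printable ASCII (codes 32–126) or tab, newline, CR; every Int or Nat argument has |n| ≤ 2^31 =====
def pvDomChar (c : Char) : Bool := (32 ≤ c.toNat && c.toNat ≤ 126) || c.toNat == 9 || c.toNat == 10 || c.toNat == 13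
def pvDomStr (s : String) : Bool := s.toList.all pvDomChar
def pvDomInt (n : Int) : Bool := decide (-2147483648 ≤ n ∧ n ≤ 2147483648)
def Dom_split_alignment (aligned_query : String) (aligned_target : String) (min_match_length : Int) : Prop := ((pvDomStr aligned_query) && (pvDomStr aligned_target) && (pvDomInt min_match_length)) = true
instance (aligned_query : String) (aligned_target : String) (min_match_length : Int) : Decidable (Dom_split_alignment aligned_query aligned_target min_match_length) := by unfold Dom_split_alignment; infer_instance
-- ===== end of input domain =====

-- B replaces A's flag-driven per-character state machine (which recomputes
-- len(query.replace("-","")) on every iteration) by a gap-boundary decomposition: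
-- a prefix array of non-gap query counts plus the list of gap positions; the
-- return values are proved equal on every input.

-- ===== PORT A =====
-- the match record {"query_start": qs, "query_end": qe, "target_start": ts, "target_end": te}
def pvEntry (qs qe ts te : Int) : List (String × Int) :=
  [("query_start", qs), ("query_end", qe), ("target_start", ts), ("target_end", te)]

-- the filter predicate: (match["target_end"] - match["target_start"] + 1) >= min_match_length
def pvPred (m : Int) (mch : List (String × Int)) : Bool :=
  decide ((mch.lookup "target_end").getD 0 - (mch.lookup "target_start").getD 0 + 1 ≥ m)

-- one iteration of A's for-loop; state = (matches, in_match as Option (query_start, target_start), query_pos, target_pos)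
def pvStepA (st : List (List (String × Int)) × Option (Int × Int) × Int × Int)
    (p : Char × Char) : List (List (String × Int)) × Option (Int × Int) × Int × Int :=
  match st, p with
  | (acc, opn, qpos, tpos), (qr, tr) =>
    if qr ≠ '-' ∧ tr ≠ '-' then
      (acc, (match opn with | none => some (qpos, tpos) | some s => some s),
       qpos + (if qr ≠ '-' then 1 else 0), tpos + 1)
    else
      match opn with
      | some (qs, ts) =>
        (acc ++ [pvEntry qs qpos ts tpos], none, qpos + (if qr ≠ '-' then 1 else 0), tpos + 1)
      | none => (acc, none, qpos + (if qr ≠ '-' then 1 else 0), tpos + 1)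

-- A's trailing 'if in_match:' append after the loop
def pvFinish (trueLen tLen : Int)
    (st : List (List (String × Int)) × Option (Int × Int) × Int × Int) :
    List (List (String × Int)) :=
  match st.2.1 with
  | some (qs, ts) => st.1 ++ [pvEntry qs trueLen ts tLen]
  | none => st.1

def split_alignment (aligned_query : String) (aligned_target : String) (min_match_length : Int) : List (List (String × Int)) :=
  let ps := aligned_query.toList.zip aligned_target.toList
  -- len(aligned_query.replace("-","")): loop-invariant pure value, computed once here
  let trueLen : Int := PySem.Str.len (PySem.Str.replace aligned_query "-" "")
  let st := ps.foldl pvStepA ([], none, 0, 0)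
  (pvFinish trueLen (PySem.Str.len aligned_target) st).filter (pvPred min_match_length)

-- ===== PORT B =====
def split_alignment_alt (aligned_query : String) (aligned_target : String) (min_match_length : Int) : List (List (String × Int)) :=
  let ps := aligned_query.toList.zip aligned_target.toList
  -- prefix: starts at [0], appends prefix[-1] + (qc != '-') per pair; List.scanl is exactly that accumulation
  let pre : List Int := ps.scanl (fun a p => a + (if p.1 ≠ '-' then 1 else 0)) 0
  -- gaps = [i for i, (qc, tc) in enumerate(pairs) if qc == '-' or tc == '-']
  let gaps : List Int := ((PySem.List.enumerate ps).filter (fun x => decide (x.2.1 = '-' ∨ x.2.2 = '-'))).map (·.1)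
  let starts : List Int := 0 :: gaps.map (· + 1)
  -- [(prefix[s], prefix[g], s, g) for s, g in zip(starts, gaps) if s < g]  (indices in range: pyGetD is exact)
  let segs : List (Int × Int × Int × Int) :=
    ((starts.zip gaps).filter (fun sg => decide (sg.1 < sg.2))).map
      (fun sg => (PySem.List.pyGetD pre sg.1 0, PySem.List.pyGetD pre sg.2 0, sg.1, sg.2))
  -- s = starts[-1]; if s < len(pairs): append the run closed by the sequence ends
  let s : Int := PySem.List.pyGetD starts (-1) 0
  let segs : List (Int × Int × Int × Int) :=
    if s < (ps.length : Int) then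
      segs ++ [(PySem.List.pyGetD pre s 0,
                PySem.Str.len aligned_query - (PySem.Str.count aligned_query "-" : Int),
                s, PySem.Str.len aligned_target)]
    else segs
  -- final comprehension: filter by the length threshold, build the dicts
  (segs.filter (fun r => decide (r.2.2.2 - r.2.2.1 + 1 ≥ min_match_length))).map
    (fun r => pvEntry r.1 r.2.1 r.2.2.1 r.2.2.2)

-- ===== PRECONDITION & SPEC =====
def Spec_split_alignment (aligned_query : String) (aligned_target : String) (min_match_length : Int) (out : List (List (String × Int))) : Prop := out = split_alignment_alt aligned_query aligned_target min_match_length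
instance (aligned_query : String) (aligned_target : String) (min_match_length : Int) (out : List (List (String × Int))) : Decidable (Spec_split_alignment aligned_query aligned_target min_match_length out) := by unfold Spec_split_alignment; infer_instance

-- ===== CLAIM (what is proved, stated in full; the proofs are below) =====
def Claim_equal_split_alignment : Prop := ∀ (aligned_query : String) (aligned_target : String) (min_match_length : Int), Dom_split_alignment aligned_query aligned_target min_match_length → Spec_split_alignment aligned_query aligned_target min_match_length (split_alignment aligned_query aligned_target min_match_length)

-- ===== LEMMAS AND PROOFS =====

-- quads (query_start, query_end, target_start, target_end), shared intermediate form
def pvKeep (m : Int) (r : Int × Int × Int × Int) : Bool := decide (r.2.2.2 - r.2.2.1 + 1 ≥ m)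

def pvOut (m : Int) (l : List (Int × Int × Int × Int)) : List (List (String × Int)) :=
  (l.filter (pvKeep m)).map (fun r => pvEntry r.1 r.2.1 r.2.2.1 r.2.2.2)

-- query-position increment of one pair
def pvD (p : Char × Char) : Int := if p.1 ≠ '-' then 1 else 0

-- the run segments both programs describe, elementwise with an open-match state
def pvRuns (tl tL : Int) : List (Char × Char) → Option (Int × Int) → Int → Int → List (Int × Int × Int × Int)
  | [], none, _, _ => []
  | [], some (qs, ts), _, _ => [(qs, tl, ts, tL)]
  | p :: rest, st, i, q =>
    if p.1 ≠ '-' ∧ p.2 ≠ '-' then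
      pvRuns tl tL rest (some (st.getD (q, i))) (i + 1) (q + 1)
    else
      match st with
      | some (qs, ts) => (qs, q, ts, i) :: pvRuns tl tL rest none (i + 1) (q + pvD p)
      | none => pvRuns tl tL rest none (i + 1) (q + pvD p)

def pvGapB (p : Char × Char) : Bool := decide (p.1 = '-' ∨ p.2 = '-')

-- local (0-based) gap positions of a pair list
def pvGapsN : List (Char × Char) → List Nat
  | [] => []
  | p :: rest => if pvGapB p then 0 :: (pvGapsN rest).map (· + 1) else (pvGapsN rest).map (· + 1)

-- non-gap query chars among the first k pairs
def pvCnt (ps : List (Char × Char)) (k : Nat) : Int := ((ps.take k).countP (fun p => p.1 != '-') : Int)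

-- last element of the starts list 0 :: gaps.map (+1)
def pvLastStart : List Nat → Nat
  | [] => 0
  | [g] => g + 1
  | _ :: t => pvLastStart t

def pvQuad (ps : List (Char × Char)) (i q : Int) (sg : Nat × Nat) : Int × Int × Int × Int :=
  (q + pvCnt ps sg.1, q + pvCnt ps sg.2, i + sg.1, i + sg.2)

-- B's gap-boundary assembly, generalized to a suffix ps at offsets (i, q); gs = its gap list
def pvAsmN (tl tL : Int) (ps : List (Char × Char)) (i q : Int) (gs : List Nat) : List (Int × Int × Int × Int) :=
  (((0 :: gs.map (· + 1)).zip gs).filter (fun sg => decide (sg.1 < sg.2))).map (pvQuad ps i q)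
  ++ (if pvLastStart gs < ps.length then
        [(q + pvCnt ps (pvLastStart gs), tl, i + pvLastStart gs, tL)]
      else [])

def pvAsm (tl tL : Int) (ps : List (Char × Char)) (i q : Int) : List (Int × Int × Int × Int) :=
  pvAsmN tl tL ps i q (pvGapsN ps)

-- the same with a match already open at (query_start qs, target_start ts)
def pvAsmC (tl tL : Int) (ps : List (Char × Char)) (i q qs ts : Int) : List Nat → List (Int × Int × Int × Int)
  | [] => [(qs, tl, ts, tL)]
  | g :: gs' =>
    (qs, q + pvCnt ps g, ts, i + g) ::
      (((((g :: gs').map (· + 1)).zip gs').filter (fun sg => decide (sg.1 < sg.2))).map (pvQuad ps i q)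
       ++ (if pvLastStart (g :: gs') < ps.length then
             [(q + pvCnt ps (pvLastStart (g :: gs')), tl, i + pvLastStart (g :: gs'), tL)]
           else []))

def pvAsmS (tl tL : Int) (ps : List (Char × Char)) (i q qs ts : Int) : List (Int × Int × Int × Int) :=
  pvAsmC tl tL ps i q qs ts (pvGapsN ps)

lemma pvPred_entry (m qs qe ts te : Int) :
    pvPred m (pvEntry qs qe ts te) = decide (te - ts + 1 ≥ m) := by
  simp [pvPred, pvEntry, List.lookup]

-- replace.go with old = ['-'], new = [] just filters out '-'
lemma pvGo_filter (l acc : List Char) (fuel : Nat) (h : l.length ≤ fuel) :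
    PySem.Chars.replace.go ['-'] [] fuel l acc
      = acc.reverse ++ l.filter (fun c => c != '-') := by
  induction l generalizing fuel acc with
  | nil =>
    cases fuel <;> simp [PySem.Chars.replace.go]
  | cons c t ih =>
    cases fuel with
    | zero => simp at h
    | succ fuel =>
      simp only [List.length_cons] at h
      have ht : t.length ≤ fuel := by omega
      rw [show PySem.Chars.replace.go ['-'] [] (fuel + 1) (c :: t) acc
          = (if List.isPrefixOf ['-'] (c :: t)
             then PySem.Chars.replace.go ['-'] [] fuel (List.drop 1 (c :: t)) ([].reverse ++ acc)
             else PySem.Chars.replace.go ['-'] [] fuel t (c :: acc)) from rfl]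
      by_cases hc : c = '-'
      · subst hc
        simp [List.isPrefixOf, ih _ _ ht]
      · have hpf : (List.isPrefixOf ['-'] (c :: t)) = false := by
          simp [List.isPrefixOf]
          exact fun h' => hc h'.symm
        rw [hpf]
        simp [ih _ _ ht, hc]

-- A's trueLen: len(q.replace('-','')) is the non-gap count
lemma pvTrueLen_eq (s : String) :
    PySem.Str.len (PySem.Str.replace s "-" "") = (s.toList.countP (fun c => c != '-') : Int) := by
  rw [PySem.Str.len_eq, PySem.Str.toList_replace]
  have h1 : "-".toList = ['-'] := rfl
  have h2 : "".toList = ([] : List Char) := rfl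
  simp only [PySem.Chars.replace, h1, h2, List.isEmpty_cons, Bool.false_eq_true, if_false]
  rw [pvGo_filter _ _ _ (le_refl _)]
  simp [List.countP_eq_length_filter]

-- count.go with a one-char needle counts that char

lemma pvOut_cons (m : Int) (r : Int × Int × Int × Int) (l : List (Int × Int × Int × Int)) :
    pvOut m (r :: l) = (if pvKeep m r then [pvEntry r.1 r.2.1 r.2.2.1 r.2.2.2] else []) ++ pvOut m l := by
  simp only [pvOut, List.filter_cons]
  split_ifs <;> simp

lemma pvAMain (tl tL m : Int) :
    ∀ (ps : List (Char × Char)) (acc : List (List (String × Int)))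
      (st : Option (Int × Int)) (i q : Int),
      (pvFinish tl tL (ps.foldl pvStepA (acc, st, q, i))).filter (pvPred m)
        = acc.filter (pvPred m) ++ pvOut m (pvRuns tl tL ps st i q) := by
  intro ps
  induction ps with
  | nil =>
    intro acc st i q
    cases st with
    | none => simp [pvFinish, pvRuns, pvOut]
    | some s =>
      obtain ⟨qs, ts⟩ := s
      simp only [List.foldl_nil, pvFinish, pvRuns, pvOut, List.filter_append,
        List.filter_cons, List.filter_nil, pvPred_entry, pvKeep]
      split_ifs <;> simp_all
  | cons p rest ih =>
    intro acc st i q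
    obtain ⟨qr, tr⟩ := p
    by_cases hok : qr ≠ '-' ∧ tr ≠ '-'
    · have hstep : pvStepA (acc, st, q, i) (qr, tr)
          = (acc, some (st.getD (q, i)), q + 1, i + 1) := by
        cases st <;> simp [pvStepA, hok]
      rw [List.foldl_cons, hstep, ih acc (some (st.getD (q, i))) (i + 1) (q + 1)]
      rw [show pvRuns tl tL ((qr, tr) :: rest) st i q
          = pvRuns tl tL rest (some (st.getD (q, i))) (i + 1) (q + 1) by
        cases st <;> simp [pvRuns, hok]]
    · have hd : (if qr ≠ '-' then (1:Int) else 0) = pvD (qr, tr) := rfl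
      cases st with
      | none =>
        have hstep : pvStepA (acc, none, q, i) (qr, tr)
            = (acc, none, q + pvD (qr, tr), i + 1) := by
          simp [pvStepA, hok, hd]
        rw [List.foldl_cons, hstep, ih acc none (i + 1) (q + pvD (qr, tr))]
        rw [show pvRuns tl tL ((qr, tr) :: rest) none i q
            = pvRuns tl tL rest none (i + 1) (q + pvD (qr, tr)) by
          simp [pvRuns, hok]]
      | some s =>
        obtain ⟨qs, ts⟩ := s
        have hstep : pvStepA (acc, some (qs, ts), q, i) (qr, tr)
            = (acc ++ [pvEntry qs q ts i], none, q + pvD (qr, tr), i + 1) := by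
          simp [pvStepA, hok, hd]
        rw [List.foldl_cons, hstep, ih _ none (i + 1) (q + pvD (qr, tr))]
        rw [show pvRuns tl tL ((qr, tr) :: rest) (some (qs, ts)) i q
            = (qs, q, ts, i) :: pvRuns tl tL rest none (i + 1) (q + pvD (qr, tr)) by
          simp [pvRuns, hok]]
        rw [pvOut_cons, List.filter_append]
        simp only [List.filter_cons, List.filter_nil, pvPred_entry, pvKeep]
        split_ifs <;> simp

lemma pvCnt_cons_succ (p : Char × Char) (rest : List (Char × Char)) (k : Nat) :
    pvCnt (p :: rest) (k + 1) = pvD p + pvCnt rest k := by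
  simp only [pvCnt, List.take_succ_cons, List.countP_cons, pvD]
  push_cast
  by_cases h : p.1 = '-'
  · simp [h]
  · simp [h]; ring

lemma pvGaps_enum (ps : List (Char × Char)) : ∀ s : Int,
    ((PySem.List.enumerate ps s).filter (fun x => decide (x.2.1 = '-' ∨ x.2.2 = '-'))).map (·.1)
      = (pvGapsN ps).map (fun k : Nat => s + (k : Int)) := by
  induction ps with
  | nil => intro s; simp [PySem.List.enumerate_nil, pvGapsN]
  | cons p rest ih =>
    intro s
    rw [PySem.List.enumerate_cons, List.filter_cons]
    by_cases hp : p.1 = '-' ∨ p.2 = '-'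
    · simp only [pvGapsN, pvGapB, hp, decide_true, if_true, List.map_cons, List.map_map,
        ih (s + 1)]
      refine List.cons_eq_cons.mpr ⟨by simp, ?_⟩
      apply List.map_congr_left; intro k _; simp only [Function.comp]; push_cast; ring
    · simp only [pvGapsN, pvGapB, hp, decide_false, Bool.false_eq_true, if_false,
        ih (s + 1), List.map_map]
      apply List.map_congr_left; intro k _; simp only [Function.comp]; push_cast; ring

lemma pvPre_getD (ps : List (Char × Char)) : ∀ (k : Nat) (c : Int), k ≤ ps.length →
    (ps.scanl (fun a p => a + (if p.1 ≠ '-' then 1 else 0)) c).getD k 0 = c + pvCnt ps k := by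
  induction ps with
  | nil =>
    intro k c hk
    simp only [List.length_nil, Nat.le_zero] at hk
    subst hk
    simp [List.scanl, pvCnt]
  | cons p rest ih =>
    intro k c hk
    rw [List.scanl_cons]
    cases k with
    | zero => simp [pvCnt]
    | succ k =>
      rw [List.getD_cons_succ, ih k _ (by simpa using Nat.succ_le_succ_iff.mp hk), pvCnt_cons_succ]
      simp [pvD]; ring

lemma pvGapsN_lt (ps : List (Char × Char)) : ∀ g ∈ pvGapsN ps, g < ps.length := by
  induction ps with
  | nil => simp [pvGapsN]
  | cons p rest ih =>
    intro g hg
    simp only [pvGapsN] at hg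
    by_cases hp : pvGapB p
    · rw [if_pos hp] at hg
      simp only [List.mem_cons, List.mem_map] at hg
      rcases hg with rfl | ⟨a, ha, rfl⟩
      · simp
      · have := ih a ha; simp; omega
    · rw [if_neg hp] at hg
      simp only [List.mem_map] at hg
      obtain ⟨a, ha, rfl⟩ := hg
      have := ih a ha; simp; omega

lemma pvLastStart_le (gs : List Nat) (n : Nat) (h : ∀ g ∈ gs, g < n) : pvLastStart gs ≤ n := by
  induction gs with
  | nil => simp [pvLastStart]
  | cons a t ih =>
    cases t with
    | nil => have := h a (by simp); simp only [pvLastStart]; omega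
    | cons b t' =>
      show pvLastStart (b :: t') ≤ n
      exact ih (fun g hg => h g (by simp [hg]))

lemma pvPyGetD_neg_one {α : Type} (l : List α) (d : α) (h : l ≠ []) :
    PySem.List.pyGetD l (-1) d = l.getLast h := by
  have hl : 0 < l.length := List.length_pos_iff.mpr h
  simp only [PySem.List.pyGetD, PySem.List.pyGet?, PySem.List.pyIdx?]
  rw [if_neg (by omega), if_pos (by omega)]
  rw [List.getLast_eq_getElem]
  simp [List.getElem?_eq_getElem (by omega : l.length - 1 < l.length)]

lemma pvBlock_shift (p : Char × Char) (rest : List (Char × Char))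
    (ss gs : List Nat) (i q : Int) :
    (((ss.map (· + 1)).zip (gs.map (· + 1))).filter (fun sg => decide (sg.1 < sg.2))).map (pvQuad (p :: rest) i q)
      = ((ss.zip gs).filter (fun sg => decide (sg.1 < sg.2))).map (pvQuad rest (i + 1) (q + pvD p)) := by
  rw [List.zip_map, List.filter_map, List.map_map]
  have hf : (fun (sg : Nat × Nat) => decide (sg.1 < sg.2)) ∘ (Prod.map (· + 1) (· + 1))
      = fun sg => decide (sg.1 < sg.2) := by
    funext sg; simp
  rw [hf]
  apply List.map_congr_left
  intro sg _
  simp only [Function.comp, pvQuad, Prod.map]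
  rw [pvCnt_cons_succ, pvCnt_cons_succ]
  push_cast
  refine Prod.ext ?_ (Prod.ext ?_ (Prod.ext ?_ ?_)) <;> simp <;> ring


lemma pvCnt_zero (ps : List (Char × Char)) : pvCnt ps 0 = 0 := by simp [pvCnt]

lemma pvLastStart_map_succ (l : List Nat) (h : l ≠ []) :
    pvLastStart (l.map (· + 1)) = pvLastStart l + 1 := by
  induction l with
  | nil => simp at h
  | cons a t ih =>
    cases t with
    | nil => rfl
    | cons b t' => simpa [pvLastStart] using ih (by simp)

lemma pvLastStart_zero_cons (l : List Nat) :
    pvLastStart (0 :: l.map (· + 1)) = pvLastStart l + 1 := by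
  cases l with
  | nil => rfl
  | cons a t => simpa [pvLastStart] using pvLastStart_map_succ (a :: t) (by simp)

-- the trailing segment shifts by one consumed pair
lemma pvTrail_shift (tl tL : Int) (p : Char × Char) (rest : List (Char × Char)) (i q : Int) (k : Nat) :
    (if k + 1 < (p :: rest).length then
       [(q + pvCnt (p :: rest) (k + 1), tl, i + ((k + 1 : Nat) : Int), tL)] else [])
      = (if k < rest.length then
       [(q + pvD p + pvCnt rest k, tl, i + 1 + (k : Int), tL)] else []) := by
  by_cases hc : k < rest.length
  · rw [if_pos (by simp only [List.length_cons]; omega), if_pos hc, pvCnt_cons_succ]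
    push_cast
    refine congrArg (fun x => [x]) ?_
    refine Prod.ext ?_ (Prod.ext ?_ (Prod.ext ?_ ?_)) <;> simp <;> ring
  · rw [if_neg (by simp only [List.length_cons]; omega), if_neg hc]


lemma pvAsmN_gap (tl tL : Int) (p : Char × Char) (rest : List (Char × Char)) (i q : Int) (G : List Nat) :
    pvAsmN tl tL (p :: rest) i q (0 :: G.map (· + 1)) = pvAsmN tl tL rest (i + 1) (q + pvD p) G := by
  unfold pvAsmN
  rw [show ((0 :: G.map (· + 1)).map (· + 1)) = (0 + 1) :: (G.map (· + 1)).map (· + 1) from rfl]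
  rw [List.zip_cons_cons, List.filter_cons, if_neg (by decide)]
  rw [show ((0 + 1 : Nat) :: (G.map (· + 1)).map (· + 1)) = ((0 :: G.map (· + 1)).map (· + 1)) from rfl]
  rw [pvBlock_shift, pvLastStart_zero_cons, pvTrail_shift]

lemma pvAsmN_run (tl tL : Int) (p : Char × Char) (rest : List (Char × Char)) (i q : Int) (G : List Nat) :
    pvAsmN tl tL (p :: rest) i q (G.map (· + 1)) = pvAsmC tl tL rest (i + 1) (q + pvD p) q i G := by
  cases G with
  | nil =>
    unfold pvAsmN pvAsmC
    simp only [List.map_nil, List.zip_nil_right, List.filter_nil, List.map_nil, List.nil_append,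
      pvLastStart, List.length_cons]
    rw [if_pos (by omega)]
    simp [pvCnt_zero]
  | cons g gs =>
    unfold pvAsmN
    rw [show ((g :: gs).map (· + 1)) = (g + 1) :: gs.map (· + 1) from rfl]
    rw [show ((((g + 1) :: gs.map (· + 1))).map (· + 1)) = ((g + 1) + 1) :: (gs.map (· + 1)).map (· + 1) from rfl]
    rw [List.zip_cons_cons, List.filter_cons, if_pos (by simp)]
    rw [List.map_cons]
    rw [show (((g + 1) + 1 : Nat) :: (gs.map (· + 1)).map (· + 1)) = (((g :: gs).map (· + 1)).map (· + 1)) from rfl]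
    rw [show ((g + 1 : Nat) :: gs.map (· + 1)) = ((g :: gs).map (· + 1)) from rfl]
    rw [pvBlock_shift, pvLastStart_map_succ (g :: gs) (by simp), pvTrail_shift]
    rw [show pvAsmC tl tL rest (i + 1) (q + pvD p) q i (g :: gs)
        = (q, (q + pvD p) + pvCnt rest g, i, (i + 1) + (g : Int)) ::
          (((((g :: gs).map (· + 1)).zip gs).filter (fun sg => decide (sg.1 < sg.2))).map (pvQuad rest (i + 1) (q + pvD p))
           ++ (if pvLastStart (g :: gs) < rest.length then
                 [((q + pvD p) + pvCnt rest (pvLastStart (g :: gs)), tl, (i + 1) + (pvLastStart (g :: gs) : Int), tL)]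
               else [])) from rfl]
    rw [List.cons_append]
    refine List.cons_eq_cons.mpr ⟨?_, rfl⟩
    simp only [pvQuad, pvCnt_zero, pvCnt_cons_succ]
    refine Prod.ext ?_ (Prod.ext ?_ (Prod.ext ?_ ?_)) <;> simp <;> ring

lemma pvAsmC_gap (tl tL : Int) (p : Char × Char) (rest : List (Char × Char)) (i q qs ts : Int) (G : List Nat) :
    pvAsmC tl tL (p :: rest) i q qs ts (0 :: G.map (· + 1))
      = (qs, q, ts, i) :: pvAsmN tl tL rest (i + 1) (q + pvD p) G := by
  rw [show pvAsmC tl tL (p :: rest) i q qs ts (0 :: G.map (· + 1))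
      = (qs, q + pvCnt (p :: rest) 0, ts, i + ((0 : Nat) : Int)) ::
        ((((0 :: G.map (· + 1)).map (· + 1)).zip (G.map (· + 1))).filter (fun sg => decide (sg.1 < sg.2))).map (pvQuad (p :: rest) i q)
         ++ (if pvLastStart (0 :: G.map (· + 1)) < (p :: rest).length then
               [(q + pvCnt (p :: rest) (pvLastStart (0 :: G.map (· + 1))), tl,
                 i + (pvLastStart (0 :: G.map (· + 1)) : Int), tL)]
             else []) from rfl]
  rw [pvBlock_shift, pvLastStart_zero_cons, pvTrail_shift]
  unfold pvAsmN
  refine List.cons_eq_cons.mpr ⟨?_, rfl⟩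
  simp [pvCnt_zero]

lemma pvAsmC_run (tl tL : Int) (p : Char × Char) (rest : List (Char × Char)) (i q qs ts : Int) (G : List Nat) :
    pvAsmC tl tL (p :: rest) i q qs ts (G.map (· + 1))
      = pvAsmC tl tL rest (i + 1) (q + pvD p) qs ts G := by
  cases G with
  | nil => rfl
  | cons g gs =>
    rw [show ((g :: gs).map (· + 1)) = (g + 1) :: gs.map (· + 1) from rfl]
    rw [show pvAsmC tl tL (p :: rest) i q qs ts ((g + 1) :: gs.map (· + 1))
        = (qs, q + pvCnt (p :: rest) (g + 1), ts, i + ((g + 1 : Nat) : Int)) ::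
          (((((g + 1) :: gs.map (· + 1)).map (· + 1)).zip (gs.map (· + 1))).filter (fun sg => decide (sg.1 < sg.2))).map (pvQuad (p :: rest) i q)
           ++ (if pvLastStart ((g + 1) :: gs.map (· + 1)) < (p :: rest).length then
                 [(q + pvCnt (p :: rest) (pvLastStart ((g + 1) :: gs.map (· + 1))), tl,
                   i + (pvLastStart ((g + 1) :: gs.map (· + 1)) : Int), tL)]
               else []) from rfl]
    rw [show ((g + 1 : Nat) :: gs.map (· + 1)) = ((g :: gs).map (· + 1)) from rfl]
    rw [pvBlock_shift, pvLastStart_map_succ (g :: gs) (by simp), pvTrail_shift]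
    rw [show pvAsmC tl tL rest (i + 1) (q + pvD p) qs ts (g :: gs)
        = (qs, (q + pvD p) + pvCnt rest g, ts, (i + 1) + (g : Int)) ::
          (((((g :: gs).map (· + 1)).zip gs).filter (fun sg => decide (sg.1 < sg.2))).map (pvQuad rest (i + 1) (q + pvD p))
           ++ (if pvLastStart (g :: gs) < rest.length then
                 [((q + pvD p) + pvCnt rest (pvLastStart (g :: gs)), tl, (i + 1) + (pvLastStart (g :: gs) : Int), tL)]
               else [])) from rfl]
    refine List.cons_eq_cons.mpr ⟨?_, rfl⟩
    rw [pvCnt_cons_succ]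
    refine Prod.ext ?_ (Prod.ext ?_ (Prod.ext ?_ ?_)) <;> simp <;> ring

lemma pvBMain (tl tL : Int) (ps : List (Char × Char)) :
    (∀ i q : Int, pvAsm tl tL ps i q = pvRuns tl tL ps none i q) ∧
    (∀ i q qs ts : Int, pvAsmS tl tL ps i q qs ts = pvRuns tl tL ps (some (qs, ts)) i q) := by
  induction ps with
  | nil =>
    constructor
    · intro i q; rfl
    · intro i q qs ts; rfl
  | cons p rest ih =>
    obtain ⟨ih1, ih2⟩ := ih
    by_cases hok : p.1 ≠ '-' ∧ p.2 ≠ '-'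
    · have hgaps : pvGapsN (p :: rest) = (pvGapsN rest).map (· + 1) := by
        simp only [pvGapsN, pvGapB]
        rw [if_neg (by simpa using not_or_intro hok.1 hok.2)]
      have hpd : pvD p = 1 := by simp [pvD, hok.1]
      constructor
      · intro i q
        rw [show pvAsm tl tL (p :: rest) i q = pvAsmN tl tL (p :: rest) i q (pvGapsN (p :: rest)) from rfl,
          hgaps, pvAsmN_run, hpd,
          show pvAsmC tl tL rest (i + 1) (q + 1) q i (pvGapsN rest)
            = pvAsmS tl tL rest (i + 1) (q + 1) q i from rfl,
          ih2 (i + 1) (q + 1) q i]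
        obtain ⟨c1, c2⟩ := p
        simp only [pvRuns, if_pos hok]
        rfl
      · intro i q qs ts
        rw [show pvAsmS tl tL (p :: rest) i q qs ts = pvAsmC tl tL (p :: rest) i q qs ts (pvGapsN (p :: rest)) from rfl,
          hgaps, pvAsmC_run, hpd,
          show pvAsmC tl tL rest (i + 1) (q + 1) qs ts (pvGapsN rest)
            = pvAsmS tl tL rest (i + 1) (q + 1) qs ts from rfl,
          ih2 (i + 1) (q + 1) qs ts]
        obtain ⟨c1, c2⟩ := p
        simp only [pvRuns, if_pos hok]
        rfl
    · have hgaps : pvGapsN (p :: rest) = 0 :: (pvGapsN rest).map (· + 1) := by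
        simp only [pvGapsN, pvGapB]
        rw [if_pos (by by_contra hcon; simp at hcon; exact hok (by tauto))]
      constructor
      · intro i q
        rw [show pvAsm tl tL (p :: rest) i q = pvAsmN tl tL (p :: rest) i q (pvGapsN (p :: rest)) from rfl,
          hgaps, pvAsmN_gap,
          show pvAsmN tl tL rest (i + 1) (q + pvD p) (pvGapsN rest)
            = pvAsm tl tL rest (i + 1) (q + pvD p) from rfl,
          ih1 (i + 1) (q + pvD p)]
        obtain ⟨c1, c2⟩ := p
        simp only [pvRuns, if_neg hok]
      · intro i q qs ts
        rw [show pvAsmS tl tL (p :: rest) i q qs ts = pvAsmC tl tL (p :: rest) i q qs ts (pvGapsN (p :: rest)) from rfl,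
          hgaps, pvAsmC_gap,
          show pvAsmN tl tL rest (i + 1) (q + pvD p) (pvGapsN rest)
            = pvAsm tl tL rest (i + 1) (q + pvD p) from rfl,
          ih1 (i + 1) (q + pvD p)]
        obtain ⟨c1, c2⟩ := p
        simp only [pvRuns, if_neg hok]

lemma pvCountGo_single (l : List Char) (acc fuel : Nat) (h : l.length ≤ fuel) :
    PySem.Chars.count.go ['-'] fuel l acc = acc + l.count '-' := by
  induction l generalizing fuel acc with
  | nil => cases fuel <;> simp [PySem.Chars.count.go]
  | cons c t ih =>
    cases fuel with
    | zero => simp at h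
    | succ fuel =>
      simp only [List.length_cons] at h
      have ht : t.length ≤ fuel := by omega
      rw [show PySem.Chars.count.go ['-'] (fuel + 1) (c :: t) acc
          = (if List.isPrefixOf ['-'] (c :: t)
             then PySem.Chars.count.go ['-'] fuel (List.drop 1 (c :: t)) (acc + 1)
             else PySem.Chars.count.go ['-'] fuel t acc) from rfl]
      by_cases hc : c = '-'
      · subst hc
        simp [List.isPrefixOf, ih _ _ ht]
        omega
      · have hpf : (List.isPrefixOf ['-'] (c :: t)) = false := by
          simp [List.isPrefixOf]
          exact fun h' => hc h'.symm
        rw [hpf, ih _ _ ht]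
        simp [hc]

lemma pvTrueLenB_eq (s : String) :
    PySem.Str.len s - (PySem.Str.count s "-" : Int) = (s.toList.countP (fun c => c != '-') : Int) := by
  rw [PySem.Str.len_eq, PySem.Str.count_eq]
  have h1 : "-".toList = ['-'] := rfl
  rw [h1]
  have hcnt : PySem.Chars.count s.toList ['-'] = s.toList.count '-' := by
    simp only [PySem.Chars.count, List.isEmpty_cons, Bool.false_eq_true, if_false]
    simpa using pvCountGo_single s.toList 0 s.toList.length (le_refl _)
  rw [hcnt]
  have h2 := List.length_eq_countP_add_countP (fun c => c != '-') (l := s.toList)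
  have h3 : List.count '-' s.toList = List.countP (fun c => decide ¬(c != '-') = true) s.toList := by
    unfold List.count
    apply List.countP_congr
    intro c _
    constructor
    · intro hcc; simp at hcc ⊢; exact hcc.symm ▸ rfl
    · intro hcc; simp at hcc ⊢; exact hcc.symm ▸ rfl
  omega

lemma pvLastStart_eq_getLast (l : List Nat) (h : l ≠ []) : pvLastStart l = l.getLast h + 1 := by
  induction l with
  | nil => simp at h
  | cons a t ih =>
    cases t with
    | nil => rfl
    | cons b t' =>
      rw [List.getLast_cons (by simp)]
      exact ih (by simp)

lemma pvGetLast_starts (l : List Nat) : (0 :: l.map (· + 1)).getLast (by simp) = pvLastStart l := by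
  cases l with
  | nil => rfl
  | cons a t =>
    rw [List.getLast_cons (by simp), List.getLast_map (by simp)]
    rw [pvLastStart_eq_getLast (a :: t) (by simp)]

lemma pvStarts_cast (gs : List Nat) :
    (0 : Int) :: ((gs.map (fun k : Nat => (k : Int))).map (· + 1))
      = (0 :: gs.map (· + 1)).map (fun k : Nat => (k : Int)) := by
  simp only [List.map_cons, List.map_map, Nat.cast_zero]
  refine List.cons_eq_cons.mpr ⟨rfl, ?_⟩
  apply List.map_congr_left; intro k _; simp

lemma pvAlt_eq_asm (aq tgt : String) (m : Int) :
    split_alignment_alt aq tgt m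
      = pvOut m (pvAsm ((aq.toList.countP (fun c => c != '-') : Int))
          (PySem.Str.len tgt) (aq.toList.zip tgt.toList) 0 0) := by
  unfold split_alignment_alt
  dsimp only
  set ps := aq.toList.zip tgt.toList with hps
  set pre := ps.scanl (fun a p => a + (if p.1 ≠ '-' then 1 else 0)) (0 : Int) with hpre
  have hgaps : ((PySem.List.enumerate ps).filter (fun x => decide (x.2.1 = '-' ∨ x.2.2 = '-'))).map (·.1)
      = (pvGapsN ps).map (fun k : Nat => (k : Int)) := by
    rw [pvGaps_enum ps 0]
    apply List.map_congr_left; intro k _; simp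
  rw [hgaps, pvStarts_cast, List.zip_map, List.filter_map, List.map_map]
  have hpred : ((fun sg : Int × Int => decide (sg.1 < sg.2)) ∘ (Prod.map (fun k : Nat => (k : Int)) (fun k : Nat => (k : Int))))
      = fun sg : Nat × Nat => decide (sg.1 < sg.2) := by
    funext sg; simp
  rw [hpred]
  have hmap : (((0 :: (pvGapsN ps).map (· + 1)).zip (pvGapsN ps)).filter (fun sg : Nat × Nat => decide (sg.1 < sg.2))).map
        ((fun sg : Int × Int => (PySem.List.pyGetD pre sg.1 0, PySem.List.pyGetD pre sg.2 0, sg.1, sg.2)) ∘ (Prod.map (fun k : Nat => (k : Int)) (fun k : Nat => (k : Int))))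
      = (((0 :: (pvGapsN ps).map (· + 1)).zip (pvGapsN ps)).filter (fun sg : Nat × Nat => decide (sg.1 < sg.2))).map (pvQuad ps 0 0) := by
    apply List.map_congr_left
    intro sg hsg
    have hz := List.of_mem_zip (List.mem_of_mem_filter hsg)
    have h1 : sg.1 ≤ ps.length := by
      rcases List.mem_cons.mp hz.1 with h0 | hmem
      · omega
      · obtain ⟨g, hg, heq⟩ := List.mem_map.mp hmem
        have := pvGapsN_lt ps g hg
        omega
    have h2 : sg.2 ≤ ps.length := le_of_lt (pvGapsN_lt ps sg.2 hz.2)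
    simp only [Function.comp, Prod.map, hpre, PySem.List.pyGetD_natCast]
    rw [pvPre_getD ps sg.1 0 h1, pvPre_getD ps sg.2 0 h2]
    simp [pvQuad]
  rw [hmap]
  have hlast : PySem.List.pyGetD ((0 :: (pvGapsN ps).map (· + 1)).map (fun k : Nat => (k : Int))) (-1) 0
      = ((pvLastStart (pvGapsN ps) : Nat) : Int) := by
    rw [pvPyGetD_neg_one _ _ (by simp), List.getLast_map (by simp), pvGetLast_starts]
  rw [hlast]
  have hle : pvLastStart (pvGapsN ps) ≤ ps.length :=
    pvLastStart_le _ _ (pvGapsN_lt ps)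
  rw [PySem.List.pyGetD_natCast, pvPre_getD ps _ 0 hle, pvTrueLenB_eq]
  simp only [Nat.cast_lt, zero_add]
  simp only [pvOut, pvAsm, pvAsmN, zero_add]
  rw [show pvKeep m = (fun r : Int × Int × Int × Int => decide (r.2.2.2 - r.2.2.1 + 1 ≥ m)) from rfl]
  by_cases hcond : pvLastStart (pvGapsN ps) < ps.length
  · rw [if_pos hcond, if_pos hcond]
  · rw [if_neg hcond, if_neg hcond, List.append_nil]

-- ===== VERDICT (by name: the statement is the Claim_ definition above) =====
theorem split_alignment_spec : Claim_equal_split_alignment := by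
  intro aq tgt m _
  unfold Spec_split_alignment
  rw [pvAlt_eq_asm]
  unfold split_alignment
  dsimp only
  rw [pvAMain (PySem.Str.len (PySem.Str.replace aq "-" "")) (PySem.Str.len tgt) m
      (aq.toList.zip tgt.toList) [] none 0 0]
  rw [pvTrueLen_eq,
    (pvBMain ((aq.toList.countP (fun c => c != '-') : Int)) (PySem.Str.len tgt)
      (aq.toList.zip tgt.toList)).1 0 0]
  simp
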